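-- pv_equiv track=rewrite | github.com/dustin-woolsey/hex_reactor | mcnpGenerator.py | write_tallys
-- ===== SOURCE A (Python) =====
-- def write_tallys(x_l, y_l):
--     ID = 100100
--     count = 0
--
--     s = ''
--
--     for index, x_i in enumerate(x_l):
--         y_i = y_l[index]
--
--         for ind, x_it in enumerate(x_i):
--             y_it = y_i[ind]
--
--
--             if count == 8:
--                 s += '&\n      '
--                 count = 0
--
--             s += str(ID) + ' '
--
--             ID += 100
--             count += 1
--
--
--     s_prime = 'c ************************* TALLY SPECIFICATION ********************************\n'
--     s_prime += 'c Flux average tally for active fuel region of all elements\n'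
--     s_prime += 'f4:n  ' + s + '\n'
--     s_prime += 'f7:n  ' + s
--
--     return s_prime
-- ===== SOURCE B (Python) =====
-- def write_tallys(x_l, y_l):
--     # Collect one token per cell in a flat list, then group into chunks of 8
--     # and join the chunks with the continuation separator.
--     tokens = []
--     for index, x_i in enumerate(x_l):
--         y_i = y_l[index]
--         for ind, x_it in enumerate(x_i):
--             y_it = y_i[ind]
--             tokens.append(str(100100 + 100 * len(tokens)) + ' ')
--     chunks = [''.join(tokens[i:i + 8]) for i in range(0, len(tokens), 8)]
--     s = '&\n      '.join(chunks)
--     s_prime = 'c ************************* TALLY SPECIFICATION ********************************\n'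
--     s_prime += 'c Flux average tally for active fuel region of all elements\n'
--     s_prime += 'f4:n  ' + s + '\n'
--     s_prime += 'f7:n  ' + s
--     return s_prime
-- ===== Notes on version B (the rewrite author's own statement) =====
-- stated objective: alternative
-- what changed: B collects a flat list of token strings in one pass, then groups it into chunks of 8 and joins the chunks with the continuation separator, instead of A's inline running-count line-break logic folded into one string accumulator.
import Mathlib
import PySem

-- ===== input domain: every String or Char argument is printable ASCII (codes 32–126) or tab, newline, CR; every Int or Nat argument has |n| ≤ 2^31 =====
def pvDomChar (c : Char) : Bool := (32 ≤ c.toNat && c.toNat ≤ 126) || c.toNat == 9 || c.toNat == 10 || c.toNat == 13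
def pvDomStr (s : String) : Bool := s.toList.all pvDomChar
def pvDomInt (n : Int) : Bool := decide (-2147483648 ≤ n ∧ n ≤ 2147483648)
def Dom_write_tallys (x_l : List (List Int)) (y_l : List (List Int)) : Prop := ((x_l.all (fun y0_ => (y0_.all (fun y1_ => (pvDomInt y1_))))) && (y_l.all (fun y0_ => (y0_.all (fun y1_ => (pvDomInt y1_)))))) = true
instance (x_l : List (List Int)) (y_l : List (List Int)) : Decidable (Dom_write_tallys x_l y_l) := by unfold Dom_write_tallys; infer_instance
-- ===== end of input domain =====

-- B replaces A's inline running-count line-break logic by a flat token list that is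
-- then chunked into groups of 8 and joined with the continuation separator (same
-- result, different decomposition; objective: alternative).


def pvHeader : String :=
  "c ************************* TALLY SPECIFICATION ********************************\n"
    ++ "c Flux average tally for active fuel region of all elements\n"

-- ===== PORT A =====
-- inner loop body of A: the dead y_i[ind] access, the count==8 line break, one token
def pvInnerA (y_i : List Int) (st2 : Int × Int × String) (q : Int × Int) : Int × Int × String :=
  let _y_it := (PySem.List.pyGet? y_i q.1).getD 0   -- y_i[ind]; value unused; in range under Pre_
  let ID := st2.1
  let count := st2.2.1
  let s := st2.2.2
  let s := if count == 8 then s ++ "&\n      " else s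
  let count := if count == 8 then (0 : Int) else count
  (ID + 100, count + 1, s ++ PySem.Int.toStr ID ++ " ")

def pvOuterA (y_l : List (List Int)) (st : Int × Int × String) (p : Int × List Int) :
    Int × Int × String :=
  let y_i := (PySem.List.pyGet? y_l p.1).getD []    -- y_l[index]; in range under Pre_
  (PySem.List.enumerate p.2).foldl (pvInnerA y_i) st

def write_tallys (x_l : List (List Int)) (y_l : List (List Int)) : String :=
  let st := (PySem.List.enumerate x_l).foldl (pvOuterA y_l) (100100, 0, "")
  let s := st.2.2
  pvHeader ++ "f4:n  " ++ s ++ "\n" ++ "f7:n  " ++ s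

-- ===== PORT B =====
-- inner loop body of B: the same dead y_i[ind] access, then append one token
def pvInnerB (y_i : List Int) (tokens : List String) (q : Int × Int) : List String :=
  let _y_it := (PySem.List.pyGet? y_i q.1).getD 0   -- y_i[ind]; value unused; in range under Pre_
  tokens ++ [PySem.Int.toStr (100100 + 100 * (tokens.length : Int)) ++ " "]

def pvOuterB (y_l : List (List Int)) (tokens : List String) (p : Int × List Int) :
    List String :=
  let y_i := (PySem.List.pyGet? y_l p.1).getD []    -- y_l[index]; in range under Pre_
  (PySem.List.enumerate p.2).foldl (pvInnerB y_i) tokens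

def write_tallys_alt (x_l : List (List Int)) (y_l : List (List Int)) : String :=
  let tokens := (PySem.List.enumerate x_l).foldl (pvOuterB y_l) []
  -- chunks = [''.join(tokens[i:i+8]) for i in range(0, len(tokens), 8)]
  let chunks := (PySem.List.pyRange 0 (tokens.length : Int) 8).map
    (fun i => PySem.Str.join "" (PySem.List.slice tokens (some i) (some (i + 8))))
  let s := PySem.Str.join "&\n      " chunks
  pvHeader ++ "f4:n  " ++ s ++ "\n" ++ "f7:n  " ++ s

-- ===== PRECONDITION & SPEC =====
-- Pre_ excludes exactly the inputs where Python A raises IndexError: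
-- some y_l[index] (index < len(x_l)) or y_i[ind] (ind < len(x_l[index])) is missing.
def Pre_write_tallys (x_l : List (List Int)) (y_l : List (List Int)) : Prop :=
  x_l.length ≤ y_l.length ∧ ∀ p ∈ x_l.zip y_l, p.1.length ≤ p.2.length
instance (x_l : List (List Int)) (y_l : List (List Int)) : Decidable (Pre_write_tallys x_l y_l) := by
  unfold Pre_write_tallys; infer_instance

def pvWitness_write_tallys : List (List Int) × List (List Int) :=
  ([[1], [2, 3]], [[4], [5, 6]])

def Spec_write_tallys (x_l : List (List Int)) (y_l : List (List Int)) (out : String) : Prop := out = write_tallys_alt x_l y_l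
instance (x_l : List (List Int)) (y_l : List (List Int)) (out : String) : Decidable (Spec_write_tallys x_l y_l out) := by unfold Spec_write_tallys; infer_instance

-- ===== CLAIM (what is proved, stated in full; the proofs are below) =====
def Claim_equal_write_tallys : Prop := ∀ (x_l : List (List Int)) (y_l : List (List Int)), Dom_write_tallys x_l y_l → Pre_write_tallys x_l y_l → Spec_write_tallys x_l y_l (write_tallys x_l y_l)

-- ===== LEMMAS AND PROOFS =====

-- proof-side helper: recursive chunks-of-8 view of the comprehension in port B
def pvChunks (rest : List String) : List String :=
  if _h : rest = [] then []
  else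
    PySem.Str.join "" (PySem.List.slice rest (some 0) (some 8))
      :: pvChunks (PySem.List.slice rest (some 8) none)
termination_by rest.length
decreasing_by
  rw [PySem.List.slice_from rest (by norm_num : (0:Int) ≤ (8:Int))]
  cases rest with
  | nil => exact absurd rfl _h
  | cons a l => simp


-- the k-th token, the running A-state after k tokens, the token list after k tokens
def pvTok (k : Nat) : String := PySem.Int.toStr (100100 + 100 * (k : Int)) ++ " "

def pvCnt (k : Nat) : Int := if k % 8 = 0 ∧ k ≠ 0 then 8 else (k % 8 : Nat)

def pvSA : Nat → String
  | 0 => ""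
  | k + 1 => pvSA k ++ (if k ≠ 0 ∧ k % 8 = 0 then "&\n      " else "") ++ pvTok k

def pvStA (k : Nat) : Int × Int × String := (100100 + 100 * (k : Int), pvCnt k, pvSA k)

def pvTokL (k : Nat) : List String := (List.range k).map pvTok

-- ---- A-side characterisation ----

theorem pvCnt_eq_8 (k : Nat) : (pvCnt k == 8) = (decide (k ≠ 0 ∧ k % 8 = 0)) := by
  unfold pvCnt
  split_ifs with h
  · simp [h.1, h.2]
  · have h1 : (((k % 8 : Nat) : Int) == 8) = false := by
      simp only [beq_eq_false_iff_ne, ne_eq]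
      omega
    rw [h1]
    by_cases h2 : k ≠ 0 ∧ k % 8 = 0
    · exact absurd ⟨h2.2, h2.1⟩ h
    · simp [h2]

theorem pvInnerA_step (y_i : List Int) (q : Int × Int) (k : Nat) :
    pvInnerA y_i (pvStA k) q = pvStA (k + 1) := by
  unfold pvInnerA pvStA
  refine Prod.ext ?_ (Prod.ext ?_ ?_)
  · push_cast; ring
  · show (if pvCnt k == 8 then (0:Int) else pvCnt k) + 1 = pvCnt (k + 1)
    unfold pvCnt
    have h8 : ∀ a b : Nat, ((a:Int) == (b:Int)) = (a == b) := by intro a b; simp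
    by_cases hc : k % 8 = 0 ∧ k ≠ 0
    · rw [if_pos hc]
      simp only [beq_self_eq_true, if_true]
      rw [if_neg (by omega)]
      have : (k + 1) % 8 = 1 := by omega
      rw [this]; norm_num
    · rw [if_neg hc]
      have hne : (((k % 8 : Nat) : Int) == 8) = false := by
        simp only [beq_eq_false_iff_ne, ne_eq]
        omega
      rw [hne]
      simp only [Bool.false_eq_true, if_false]
      by_cases hd : (k + 1) % 8 = 0
      · rw [if_pos ⟨hd, by omega⟩]
        have : k % 8 = 7 := by omega
        rw [this]; norm_num
      · rw [if_neg (by tauto)]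
        have : (k + 1) % 8 = k % 8 + 1 := by omega
        rw [this]; push_cast; ring
  · show (if pvCnt k == 8 then pvSA k ++ "&\n      " else pvSA k) ++ PySem.Int.toStr (100100 + 100 * (k:Int)) ++ " " = pvSA (k + 1)
    rw [pvCnt_eq_8]
    show _ = pvSA k ++ (if k ≠ 0 ∧ k % 8 = 0 then "&\n      " else "") ++ pvTok k
    unfold pvTok
    by_cases h : k ≠ 0 ∧ k % 8 = 0 <;>
      simp [h, String.append_assoc, String.append_empty]

theorem pvInnerA_fold (y_i : List Int) (l : List (Int × Int)) (k : Nat) :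
    l.foldl (pvInnerA y_i) (pvStA k) = pvStA (k + l.length) := by
  induction l generalizing k with
  | nil => simp
  | cons a l ih =>
    simp only [List.foldl_cons, pvInnerA_step, ih, List.length_cons]
    congr 1; omega

theorem pvOuterA_fold (y_l : List (List Int)) (l : List (Int × List Int)) (k : Nat) :
    l.foldl (pvOuterA y_l) (pvStA k) = pvStA (k + (l.map (fun p => p.2.length)).sum) := by
  induction l generalizing k with
  | nil => simp
  | cons a l ih =>
    simp only [List.foldl_cons, pvOuterA, pvInnerA_fold, PySem.List.length_enumerate, ih,
      List.map_cons, List.sum_cons]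
    congr 1; omega

def pvTotal (x_l : List (List Int)) : Nat := (x_l.map List.length).sum

theorem pvA_char (x_l y_l : List (List Int)) :
    write_tallys x_l y_l =
      pvHeader ++ "f4:n  " ++ pvSA (pvTotal x_l) ++ "\n" ++ "f7:n  " ++ pvSA (pvTotal x_l) := by
  unfold write_tallys
  have h0 : (100100, (0:Int), "") = pvStA 0 := by simp [pvStA, pvCnt, pvSA]
  rw [h0, pvOuterA_fold]
  have hm : ((PySem.List.enumerate x_l).map (fun p => p.2.length)).sum = pvTotal x_l := by
    unfold pvTotal
    conv_rhs => rw [← PySem.List.map_snd_enumerate (xs := x_l) (s := 0)]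
    rw [List.map_map]
    rfl
  rw [hm]
  simp only [pvStA, Nat.zero_add]

-- ---- B-side: the token list ----

theorem pvTokL_succ (k : Nat) : pvTokL (k + 1) = pvTokL k ++ [pvTok k] := by
  simp [pvTokL, List.range_succ]

theorem pvTokL_length (k : Nat) : (pvTokL k).length = k := by simp [pvTokL]

theorem pvInnerB_step (y_i : List Int) (q : Int × Int) (k : Nat) :
    pvInnerB y_i (pvTokL k) q = pvTokL (k + 1) := by
  unfold pvInnerB
  rw [pvTokL_succ, pvTokL_length]
  rfl

theorem pvInnerB_fold (y_i : List Int) (l : List (Int × Int)) (k : Nat) :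
    l.foldl (pvInnerB y_i) (pvTokL k) = pvTokL (k + l.length) := by
  induction l generalizing k with
  | nil => simp
  | cons a l ih =>
    simp only [List.foldl_cons, pvInnerB_step, ih, List.length_cons]
    congr 1; omega

theorem pvOuterB_fold (y_l : List (List Int)) (l : List (Int × List Int)) (k : Nat) :
    l.foldl (pvOuterB y_l) (pvTokL k) = pvTokL (k + (l.map (fun p => p.2.length)).sum) := by
  induction l generalizing k with
  | nil => simp
  | cons a l ih =>
    simp only [List.foldl_cons, pvOuterB, pvInnerB_fold, PySem.List.length_enumerate, ih,
      List.map_cons, List.sum_cons]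
    congr 1; omega

-- ---- string-join helpers ----

theorem pvJoin_nil (sep : String) : PySem.Str.join sep [] = "" := by
  apply String.toList_inj.mp
  simp [PySem.Str.toList_join, PySem.Chars.join_nil]

theorem pvJoin_singleton (sep p : String) : PySem.Str.join sep [p] = p := by
  apply String.toList_inj.mp
  simp [PySem.Str.toList_join, PySem.Chars.join_singleton]

theorem pvJoin_cons_cons (sep p q : String) (rest : List String) :
    PySem.Str.join sep (p :: q :: rest) = p ++ sep ++ PySem.Str.join sep (q :: rest) := by
  apply String.toList_inj.mp
  simp [PySem.Str.toList_join, PySem.Chars.join_cons_cons, String.toList_append]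

theorem pvJoin_empty_cons (p : String) (rest : List String) :
    PySem.Str.join "" (p :: rest) = p ++ PySem.Str.join "" rest := by
  cases rest with
  | nil => rw [pvJoin_singleton, pvJoin_nil, String.append_empty]
  | cons q r =>
    rw [pvJoin_cons_cons, String.append_empty]

theorem pvJoin_empty_append (l1 l2 : List String) :
    PySem.Str.join "" (l1 ++ l2) = PySem.Str.join "" l1 ++ PySem.Str.join "" l2 := by
  induction l1 with
  | nil => simp [pvJoin_nil, String.empty_append]
  | cons a l ih =>
    simp only [List.cons_append, pvJoin_empty_cons, ih, String.append_assoc]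

-- ---- chunking ----

theorem pvChunks_eq (rest : List String) :
    pvChunks rest =
      if rest = [] then []
      else PySem.Str.join "" (rest.take 8) :: pvChunks (rest.drop 8) := by
  rw [pvChunks]
  split
  · rfl
  · rw [PySem.List.slice_from rest (by norm_num : (0:Int) ≤ (8:Int))]
    rw [PySem.List.slice_zero_start, PySem.List.slice_to rest (by norm_num : (0:Int) ≤ (8:Int))]
    rfl

theorem pvChunks_ne_nil (rest : List String) (h : rest ≠ []) : pvChunks rest ≠ [] := by
  rw [pvChunks_eq, if_neg h]; simp

def pvChJoin (ts : List String) : String := PySem.Str.join "&\n      " (pvChunks ts)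

theorem pvChJoin_snoc : ∀ (n : Nat) (ts : List String), ts.length = n → ∀ (t : String),
    pvChJoin (ts ++ [t]) =
      pvChJoin ts ++ (if ts ≠ [] ∧ ts.length % 8 = 0 then "&\n      " else "") ++ t := by
  intro n
  induction n using Nat.strong_induction_on with
  | _ n ih =>
    intro ts hlen t
    have hch1 : pvChunks [t] = [PySem.Str.join "" [t]] := by
      rw [pvChunks_eq, if_neg (List.cons_ne_nil t []),
        List.take_of_length_le (by simp), List.drop_eq_nil_of_le (by simp),
        pvChunks_eq, if_pos rfl]
    by_cases hnil : ts = []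
    · subst hnil
      have hch0 : pvChunks ([] : List String) = [] := by rw [pvChunks_eq, if_pos rfl]
      unfold pvChJoin
      rw [List.nil_append, hch1, hch0, pvJoin_nil, pvJoin_singleton, pvJoin_singleton,
        if_neg (by simp)]
      simp [String.empty_append]
    · by_cases h8 : ts.length < 8
      · -- 1 ≤ len ≤ 7 : still a single chunk
        have hcha : pvChunks (ts ++ [t]) = [PySem.Str.join "" (ts ++ [t])] := by
          rw [pvChunks_eq, if_neg (by simp),
            List.take_of_length_le (by simp; omega), List.drop_eq_nil_of_le (by simp; omega),
            pvChunks_eq, if_pos rfl]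
        have hchb : pvChunks ts = [PySem.Str.join "" ts] := by
          rw [pvChunks_eq, if_neg hnil,
            List.take_of_length_le (by omega), List.drop_eq_nil_of_le (by omega),
            pvChunks_eq, if_pos rfl]
        have hcond : ¬ (ts ≠ [] ∧ ts.length % 8 = 0) := by
          rintro ⟨h1, h2⟩
          have : 0 < ts.length := List.length_pos_of_ne_nil h1
          omega
        unfold pvChJoin
        rw [hcha, hchb, pvJoin_singleton, pvJoin_singleton, if_neg hcond,
          pvJoin_empty_append, pvJoin_singleton]
        simp [String.append_empty]
      · -- len ≥ 8 : first chunk unchanged, recurse on the tail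
        have h8' : 8 ≤ ts.length := by omega
        have hts : (ts ++ [t]).take 8 = ts.take 8 := List.take_append_of_le_length h8'
        have htd : (ts ++ [t]).drop 8 = ts.drop 8 ++ [t] := List.drop_append_of_le_length h8'
        have hcha : pvChunks (ts ++ [t])
            = PySem.Str.join "" (ts.take 8) :: pvChunks (ts.drop 8 ++ [t]) := by
          rw [pvChunks_eq, if_neg (by simp), hts, htd]
        have hchb : pvChunks ts = PySem.Str.join "" (ts.take 8) :: pvChunks (ts.drop 8) := by
          rw [pvChunks_eq, if_neg hnil]
        by_cases hgt : ts.length = 8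
        · -- exactly one full chunk so far
          have hd0 : ts.drop 8 = [] := List.drop_eq_nil_of_le (by omega)
          have hch0 : pvChunks ([] : List String) = [] := by rw [pvChunks_eq, if_pos rfl]
          rw [hd0, List.nil_append, hch1] at hcha
          rw [hd0, hch0] at hchb
          unfold pvChJoin
          rw [hcha, hchb, pvJoin_cons_cons, pvJoin_singleton, pvJoin_singleton,
            pvJoin_singleton, if_pos ⟨hnil, by omega⟩]
        · -- more than one chunk: use the induction hypothesis on ts.drop 8
          have hdnil : ts.drop 8 ≠ [] := by
            intro h; rw [List.drop_eq_nil_iff] at h; omega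
          have hdlt : (ts.drop 8).length < n := by
            have : (ts.drop 8).length = ts.length - 8 := by simp
            omega
          have ihd := ih (ts.drop 8).length hdlt (ts.drop 8) rfl t
          have hc1 : pvChunks (ts.drop 8 ++ [t]) ≠ [] := pvChunks_ne_nil _ (by simp)
          have hc2 : pvChunks (ts.drop 8) ≠ [] := pvChunks_ne_nil _ hdnil
          obtain ⟨c1, l1, hl1⟩ := List.exists_cons_of_ne_nil hc1
          obtain ⟨c2, l2, hl2⟩ := List.exists_cons_of_ne_nil hc2
          have hcond : (if ts ≠ [] ∧ ts.length % 8 = 0 then "&\n      " else "")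
              = (if ts.drop 8 ≠ [] ∧ (ts.drop 8).length % 8 = 0 then "&\n      " else "") := by
            have hmod : (ts.drop 8).length % 8 = ts.length % 8 := by
              have : (ts.drop 8).length = ts.length - 8 := by simp
              omega
            simp only [hdnil, hnil, ne_eq, not_false_eq_true, true_and, hmod]
          unfold pvChJoin
          rw [hcha, hl1, pvJoin_cons_cons, ← hl1]
          have ihd' : PySem.Str.join "&\n      " (pvChunks (ts.drop 8 ++ [t]))
              = PySem.Str.join "&\n      " (pvChunks (ts.drop 8))
                ++ (if ts.drop 8 ≠ [] ∧ (ts.drop 8).length % 8 = 0 then "&\n      " else "") ++ t :=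
            ihd
          rw [ihd', hchb, hl2, pvJoin_cons_cons, ← hl2, hcond]
          simp [String.append_assoc]

theorem pvSA_succ (k : Nat) :
    pvSA (k + 1) = pvSA k ++ (if k ≠ 0 ∧ k % 8 = 0 then "&\n      " else "") ++ pvTok k := rfl

theorem pvChJoin_tokL (n : Nat) : pvChJoin (pvTokL n) = pvSA n := by
  induction n with
  | zero =>
    unfold pvChJoin pvTokL
    simp only [List.range_zero, List.map_nil]
    rw [pvChunks_eq, if_pos rfl, pvJoin_nil]
    rfl
  | succ n ih =>
    rw [pvTokL_succ, pvChJoin_snoc (pvTokL n).length (pvTokL n) rfl, ih, pvTokL_length,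
      pvSA_succ]
    congr 2
    by_cases h0 : n = 0
    · subst h0; simp [pvTokL]
    · have : pvTokL n ≠ [] := by
        simp [pvTokL, List.range_eq_nil]
        omega
      simp [this, h0]

theorem pvRange8_cons (n : Int) (h : 0 < n) :
    PySem.List.pyRange 0 n 8 = 0 :: (PySem.List.pyRange 0 (n - 8) 8).map (· + 8) := by
  rw [PySem.List.pyRange_of_pos 0 n (by norm_num), PySem.List.pyRange_of_pos 0 (n - 8) (by norm_num)]
  have hm : (if (0:Int) < n then ((n - 0 + 8 - 1) / 8).toNat else 0)
      = (if (0:Int) < n - 8 then ((n - 8 - 0 + 8 - 1) / 8).toNat else 0) + 1 := by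
    split_ifs <;> omega
  rw [hm, List.range_succ_eq_map]
  simp only [List.map_cons, List.map_map]
  refine congrArg₂ _ (by norm_num) ?_
  apply List.map_congr_left
  intro k _
  simp only [Function.comp_apply, Nat.succ_eq_add_one]
  push_cast
  ring

theorem pvRangeChunks : ∀ (n : Nat) (ts : List String), ts.length = n →
    (PySem.List.pyRange 0 (ts.length : Int) 8).map
      (fun i => PySem.Str.join "" (PySem.List.slice ts (some i) (some (i + 8))))
      = pvChunks ts := by
  intro n
  induction n using Nat.strong_induction_on with
  | _ n ih =>
    intro ts hlen
    by_cases hnil : ts = []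
    · subst hnil
      rw [pvChunks_eq, if_pos rfl]
      simp [PySem.List.pyRange_of_pos 0 0 (by norm_num : (0:Int) < 8)]
    · have hpos : 0 < ts.length := List.length_pos_of_ne_nil hnil
      rw [pvChunks_eq, if_neg hnil,
        pvRange8_cons (ts.length : Int) (by exact_mod_cast hpos), List.map_cons, List.map_map]
      refine congrArg₂ _ ?_ ?_
      · -- head chunk: ts[0:8]
        rw [PySem.List.slice_zero_start, PySem.List.slice_to ts (by norm_num : (0:Int) ≤ 0 + 8)]
        rfl
      · -- tail chunks: shift the range by 8 and recurse on ts.drop 8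
        have ihd := ih (ts.drop 8).length (by simp; omega) (ts.drop 8) rfl
        rw [← ihd]
        have hlen8 : ((ts.drop 8).length : Int) = ts.length - 8 ∨ (ts.length < 8) := by
          by_cases h8 : 8 ≤ ts.length
          · left; simp; omega
          · right; omega
        rcases hlen8 with h8 | h8
        · rw [← h8]
          apply List.map_congr_left
          intro i hi
          have hi0 : 0 ≤ i := by
            rcases (PySem.List.mem_pyRange_iff_of_pos (by norm_num : (0:Int) < 8) i).mp hi
              with ⟨h1, _⟩
            exact h1
          show PySem.Str.join "" (PySem.List.slice ts (some (i + 8)) (some (i + 8 + 8))) = _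
          congr 1
          rw [PySem.List.slice_toNat ts (by omega) (by omega),
            PySem.List.slice_toNat (ts.drop 8) hi0 (by omega), List.drop_drop]
          congr 1
          · omega
          · congr 1
            omega
        · -- fewer than 8 elements left: both ranges are empty
          have h1 : PySem.List.pyRange 0 ((ts.length : Int) - 8) 8 = [] := by
            rw [PySem.List.pyRange_of_pos _ _ (by norm_num : (0:Int) < 8), if_neg (by omega)]
            simp
          have h2 : PySem.List.pyRange 0 (((ts.drop 8).length : Int)) 8 = [] := by
            have : (ts.drop 8).length = 0 := by simp; omega
            rw [this]
            rw [PySem.List.pyRange_of_pos _ _ (by norm_num : (0:Int) < 8), if_neg (by omega)]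
            simp
          rw [h1, h2, List.map_nil, List.map_nil]

theorem pvB_char (x_l y_l : List (List Int)) :
    write_tallys_alt x_l y_l =
      pvHeader ++ "f4:n  " ++ pvSA (pvTotal x_l) ++ "\n" ++ "f7:n  " ++ pvSA (pvTotal x_l) := by
  unfold write_tallys_alt
  have h0 : ([] : List String) = pvTokL 0 := by simp [pvTokL]
  rw [h0, pvOuterB_fold]
  have hm : ((PySem.List.enumerate x_l).map (fun p => p.2.length)).sum = pvTotal x_l := by
    unfold pvTotal
    conv_rhs => rw [← PySem.List.map_snd_enumerate (xs := x_l) (s := 0)]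
    rw [List.map_map]
    rfl
  rw [hm, Nat.zero_add]
  show pvHeader ++ "f4:n  "
      ++ PySem.Str.join "&\n      " ((PySem.List.pyRange 0 ((pvTokL (pvTotal x_l)).length : Int) 8).map
          (fun i => PySem.Str.join "" (PySem.List.slice (pvTokL (pvTotal x_l)) (some i) (some (i + 8)))))
      ++ "\n" ++ "f7:n  "
      ++ PySem.Str.join "&\n      " ((PySem.List.pyRange 0 ((pvTokL (pvTotal x_l)).length : Int) 8).map
          (fun i => PySem.Str.join "" (PySem.List.slice (pvTokL (pvTotal x_l)) (some i) (some (i + 8))))) = _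
  rw [pvRangeChunks (pvTokL (pvTotal x_l)).length (pvTokL (pvTotal x_l)) rfl]
  rw [show PySem.Str.join "&\n      " (pvChunks (pvTokL (pvTotal x_l))) = pvSA (pvTotal x_l) from
    pvChJoin_tokL (pvTotal x_l)]

-- ===== VERDICT (by name: the statement is the Claim_ definition above) =====
theorem write_tallys_spec : Claim_equal_write_tallys := by
  intro x_l y_l _ _
  unfold Spec_write_tallys
  rw [pvA_char, pvB_char]
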